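-- pv_equiv track=rewrite | github.com/bhofmei/analysis-scripts | chip/rpkm_by_fpkm_pe.py | countsPerRegion
-- ===== SOURCE A (Python) =====
-- def countsPerRegion( bedDict, chrm, start, end ):
-- 	counts = 0
-- 	for i in range(start, end+1):
-- 		try:
-- 			dictEntry = bedDict.get(chrm).get(i)
-- 			if dictEntry != None:
-- 				counts += dictEntry
-- 		except AttributeError:
-- 			pass
-- 	# end for
-- 	return counts
-- ===== SOURCE B (Python) =====
-- def countsPerRegion(bedDict, chrm, start, end):
--     # Sort the chromosome's stored positions once, then scan the sorted
--     # items in increasing position order, stopping as soon as a position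
--     # passes the end of the region.
--     inner = bedDict.get(chrm)
--     if inner is None:
--         return 0
--     total = 0
--     for k, v in sorted(inner.items(), key=lambda kv: kv[0]):
--         if end < k:
--             break
--         if start <= k:
--             total += v
--     return total
-- ===== Notes on version B (the rewrite author's own statement) =====
-- stated objective: alternative
-- what changed: Instead of looping over every coordinate i in [start, end] with a dict lookup per coordinate, B sorts the chromosome's stored (position, count) items by position once and scans them in increasing order, breaking as soon as a position exceeds end; cost depends on the number of stored entries, not on the region width.
import Mathlib
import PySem

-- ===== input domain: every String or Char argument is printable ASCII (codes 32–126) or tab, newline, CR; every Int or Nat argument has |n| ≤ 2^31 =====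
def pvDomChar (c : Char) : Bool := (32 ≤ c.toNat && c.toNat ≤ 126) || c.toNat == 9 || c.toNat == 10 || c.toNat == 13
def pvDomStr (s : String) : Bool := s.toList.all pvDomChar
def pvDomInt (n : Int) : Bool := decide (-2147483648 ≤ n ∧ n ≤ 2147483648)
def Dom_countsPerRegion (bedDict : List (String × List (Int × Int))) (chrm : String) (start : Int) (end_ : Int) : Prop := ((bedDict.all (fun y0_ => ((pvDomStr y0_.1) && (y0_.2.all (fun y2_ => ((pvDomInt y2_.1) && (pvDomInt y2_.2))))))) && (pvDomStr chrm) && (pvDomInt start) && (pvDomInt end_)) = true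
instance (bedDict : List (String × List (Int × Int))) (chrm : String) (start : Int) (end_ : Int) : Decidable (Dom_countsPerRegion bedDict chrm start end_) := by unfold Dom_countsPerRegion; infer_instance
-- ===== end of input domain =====

-- B replaces A's per-coordinate scan of [start, end] with a scan of the chromosome's
-- stored (position, count) items sorted by position, breaking once past the region's end.


-- ===== PORT A =====
-- for i in range(start, end+1): look chrm up, then i; add the entry if present
def countsPerRegion (bedDict : List (String × List (Int × Int))) (chrm : String) (start : Int) (end_ : Int) : Int :=
  (PySem.List.pyRange start (end_ + 1) 1).foldl
    (fun counts i =>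
      match (PySem.Dict.mk bedDict).get? chrm with
      | none => counts            -- bedDict.get(chrm) is None: AttributeError, caught, pass
      | some inner =>
        match (PySem.Dict.mk inner).get? i with
        | some v => counts + v
        | none => counts) 0

-- ===== PORT B =====
-- scan the key-sorted items in increasing position order; 'break' once end_ < position
def goScan (start end_ : Int) : List (Int × Int) → Int → Int
  | [], total => total
  | kv :: rest, total =>
    if end_ < kv.1 then total                                   -- break
    else if start ≤ kv.1 then goScan start end_ rest (total + kv.2)
    else goScan start end_ rest total

def countsPerRegion_alt (bedDict : List (String × List (Int × Int))) (chrm : String) (start : Int) (end_ : Int) : Int :=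
  match (PySem.Dict.mk bedDict).get? chrm with
  | none => 0
  | some inner => goScan start end_ (PySem.List.sorted inner Prod.fst false) 0

-- ===== PRECONDITION & SPEC =====
-- Pre_ excludes only assoc lists whose looked-up chromosome entry carries duplicate positions:
-- a real Python dict can never hold duplicate keys, so such inputs are artifacts of the
-- assoc-list encoding on which a first-match-vs-all-entries reading is anybody's choice.
def Pre_countsPerRegion (bedDict : List (String × List (Int × Int))) (chrm : String) (start : Int) (end_ : Int) : Prop :=
  (match (PySem.Dict.mk bedDict).get? chrm with
   | none => true
   | some inner => decide (inner.map Prod.fst).Nodup) = true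
instance (bedDict : List (String × List (Int × Int))) (chrm : String) (start : Int) (end_ : Int) : Decidable (Pre_countsPerRegion bedDict chrm start end_) := by unfold Pre_countsPerRegion; infer_instance

def pvWitness_countsPerRegion : (List (String × List (Int × Int))) × String × Int × Int :=
  ([("chr1", [(1, 2), (3, 4)]), ("chr2", [(1, 5)])], "chr1", 0, 10)

def Spec_countsPerRegion (bedDict : List (String × List (Int × Int))) (chrm : String) (start : Int) (end_ : Int) (out : Int) : Prop := out = countsPerRegion_alt bedDict chrm start end_
instance (bedDict : List (String × List (Int × Int))) (chrm : String) (start : Int) (end_ : Int) (out : Int) : Decidable (Spec_countsPerRegion bedDict chrm start end_ out) := by unfold Spec_countsPerRegion; infer_instance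

-- ===== CLAIM (what is proved, stated in full; the proofs are below) =====
def Claim_equal_countsPerRegion : Prop := ∀ (bedDict : List (String × List (Int × Int))) (chrm : String) (start : Int) (end_ : Int), Dom_countsPerRegion bedDict chrm start end_ → Pre_countsPerRegion bedDict chrm start end_ → Spec_countsPerRegion bedDict chrm start end_ (countsPerRegion bedDict chrm start end_)

-- ===== LEMMAS AND PROOFS =====

-- a fold that only adds is the sum of a map
theorem foldl_add_eq_sum_map {α : Type} (f : α → Int) (l : List α) (i : Int) :
    l.foldl (fun a x => a + f x) i = i + (l.map f).sum := by
  induction l generalizing i with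
  | nil => simp
  | cons x t ih => simp [List.foldl_cons, ih]; ring

-- summing an 'if i = k then v else g i' over a duplicate-free list isolates k's contribution
theorem sum_map_ite_eq (R : List Int) (k v : Int) (g : Int → Int) (h : R.Nodup) (hg : g k = 0) :
    (R.map (fun i => if i = k then v else g i)).sum
      = (if k ∈ R then v else 0) + (R.map g).sum := by
  induction R with
  | nil => simp
  | cons r t ih =>
    rcases List.nodup_cons.mp h with ⟨hr, ht⟩
    by_cases hk : r = k
    · subst hk
      have hmap : (t.map (fun i => if i = r then v else g i)) = t.map g := by
        apply List.map_congr_left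
        intro i hi
        have : i ≠ r := fun h' => hr (h' ▸ hi)
        simp [this]
      simp [hmap, hr, hg]
    · have hmem : (k ∈ r :: t) = (k ∈ t) := by
        simp [Ne.symm hk]
      simp only [List.map_cons, List.sum_cons, ih ht, hmem]
      simp only [if_neg hk]
      ring

-- per-coordinate first-match lookups over the region = the in-range entries of the items,
-- provided the keys are duplicate-free
theorem range_lookup_eq_items_sum (L : List (Int × Int)) (start end_ : Int)
    (h : (L.map Prod.fst).Nodup) :
    ((PySem.List.pyRange start (end_ + 1) 1).map
        (fun i => match (PySem.Dict.mk L).get? i with | some v => v | none => 0)).sum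
      = (L.map (fun kv => if start ≤ kv.1 ∧ kv.1 ≤ end_ then kv.2 else 0)).sum := by
  induction L with
  | nil =>
    simp [PySem.Dict.get?]
  | cons kv t ih =>
    obtain ⟨k, v⟩ := kv
    simp only [List.map_cons] at h
    rcases List.nodup_cons.mp h with ⟨hk, ht⟩
    have hstep : ∀ i, (match (PySem.Dict.mk ((k, v) :: t)).get? i with | some w => w | none => 0)
        = if i = k then v else (match (PySem.Dict.mk t).get? i with | some w => w | none => 0) := by
      intro i
      rw [PySem.Dict.get?_mk_cons]
      by_cases hik : i = k
      · subst hik; simp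
      · have hne : (k == i) = false := by simp [Ne.symm hik]
        simp [hne, hik]
    calc ((PySem.List.pyRange start (end_ + 1) 1).map
            (fun i => match (PySem.Dict.mk ((k, v) :: t)).get? i with | some w => w | none => 0)).sum
        = ((PySem.List.pyRange start (end_ + 1) 1).map
            (fun i => if i = k then v
              else (match (PySem.Dict.mk t).get? i with | some w => w | none => 0))).sum := by
          exact congrArg List.sum (List.map_congr_left (fun i _ => hstep i))
      _ = (if k ∈ PySem.List.pyRange start (end_ + 1) 1 then v else 0)
            + ((PySem.List.pyRange start (end_ + 1) 1).map
                (fun i => match (PySem.Dict.mk t).get? i with | some w => w | none => 0)).sum := by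
          refine sum_map_ite_eq _ k v _ (PySem.List.nodup_pyRange_one start (end_ + 1)) ?_
          have : (PySem.Dict.mk t).get? k = none := by
            rw [PySem.Dict.get?_eq_none_iff_not_mem_keys]
            simpa using hk
          simp [this]
      _ = (if start ≤ k ∧ k ≤ end_ then v else 0)
            + (t.map (fun kv => if start ≤ kv.1 ∧ kv.1 ≤ end_ then kv.2 else 0)).sum := by
          rw [ih ht]
          congr 1
          by_cases hr : start ≤ k ∧ k ≤ end_
          · have : k ∈ PySem.List.pyRange start (end_ + 1) 1 := by
              rw [PySem.List.mem_pyRange_one]; omega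
          
            simp [this, hr]
          · have : k ∉ PySem.List.pyRange start (end_ + 1) 1 := by
              rw [PySem.List.mem_pyRange_one]; omega
            simp [this, hr]
      _ = (((k, v) :: t).map (fun kv => if start ≤ kv.1 ∧ kv.1 ≤ end_ then kv.2 else 0)).sum := by
          simp

-- the break-scan over a key-ascending list sums exactly the in-range entries
theorem goScan_eq_sum (start end_ : Int) (l : List (Int × Int)) (t : Int)
    (h : l.Pairwise (fun a b => a.1 ≤ b.1)) :
    goScan start end_ l t
      = t + (l.map (fun kv => if start ≤ kv.1 ∧ kv.1 ≤ end_ then kv.2 else 0)).sum := by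
  induction l generalizing t with
  | nil => simp [goScan]
  | cons kv rest ih =>
    rcases List.pairwise_cons.mp h with ⟨hhead, hrest⟩
    by_cases hb : end_ < kv.1
    · have hzero : ∀ x ∈ rest, (if start ≤ x.1 ∧ x.1 ≤ end_ then x.2 else 0) = 0 := by
        intro x hx
        have := hhead x hx
        have : ¬ (start ≤ x.1 ∧ x.1 ≤ end_) := by omega
        simp [this]
      have hsum : (rest.map (fun kv => if start ≤ kv.1 ∧ kv.1 ≤ end_ then kv.2 else 0)).sum = 0 := by
        apply List.sum_eq_zero
        intro x hx
        rcases List.mem_map.mp hx with ⟨y, hy, rfl⟩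
        exact hzero y hy
      have hhd : ¬ (start ≤ kv.1 ∧ kv.1 ≤ end_) := by omega
      simp [goScan, hb, hhd, hsum]
    · by_cases hs : start ≤ kv.1
      · have hin : start ≤ kv.1 ∧ kv.1 ≤ end_ := by omega
        simp [goScan, hb, hs, ih _ hrest, hin]
        ring
      · have hout : ¬ (start ≤ kv.1 ∧ kv.1 ≤ end_) := by simp [hs]
        simp [goScan, hb, hs, ih _ hrest, hout]

-- ===== VERDICT (by name: the statement is the Claim_ definition above) =====
theorem countsPerRegion_spec : Claim_equal_countsPerRegion := by
  intro bedDict chrm start end_ _ hpre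
  unfold Spec_countsPerRegion countsPerRegion countsPerRegion_alt
  unfold Pre_countsPerRegion at hpre
  cases hget : (PySem.Dict.mk bedDict).get? chrm with
  | none =>
    simp only [hget]
    generalize PySem.List.pyRange start (end_ + 1) 1 = R
    induction R with
    | nil => rfl
    | cons x t ih => simpa using ih
  | some inner =>
    rw [hget] at hpre
    simp only [decide_eq_true_eq] at hpre
    simp only [hget]
    have hA : (PySem.List.pyRange start (end_ + 1) 1).foldl
        (fun counts i => match (PySem.Dict.mk inner).get? i with
          | some v => counts + v | none => counts) 0
        = ((PySem.List.pyRange start (end_ + 1) 1).map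
            (fun i => match (PySem.Dict.mk inner).get? i with | some v => v | none => 0)).sum := by
      rw [show (fun (counts : Int) (i : Int) => match (PySem.Dict.mk inner).get? i with
            | some v => counts + v | none => counts)
          = (fun counts i => counts + match (PySem.Dict.mk inner).get? i with
            | some v => v | none => 0) from ?_]
      · rw [foldl_add_eq_sum_map]; ring
      · funext c i; cases (PySem.Dict.mk inner).get? i <;> simp
    have hB : goScan start end_ (PySem.List.sorted inner Prod.fst false) 0
        = ((PySem.List.sorted inner Prod.fst false).map
            (fun kv => if start ≤ kv.1 ∧ kv.1 ≤ end_ then kv.2 else 0)).sum := by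
      rw [goScan_eq_sum start end_ _ 0 (PySem.List.sorted_pairwise inner Prod.fst)]
      ring
    have hperm : ((PySem.List.sorted inner Prod.fst false).map
            (fun kv => if start ≤ kv.1 ∧ kv.1 ≤ end_ then kv.2 else 0)).sum
        = (inner.map (fun kv => if start ≤ kv.1 ∧ kv.1 ≤ end_ then kv.2 else 0)).sum :=
      List.Perm.sum_eq (List.Perm.map _ (PySem.List.sorted_perm inner Prod.fst false))
    rw [hA, hB, hperm, range_lookup_eq_items_sum inner start end_ hpre]
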